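-- pv_equiv track=rewrite | github.com/jetperch/pyjoulescope_ui | joulescope_ui/tooltip.py | tooltip_format
-- ===== SOURCE A (Python) =====
-- def tooltip_format(header: str, body: str) -> str:
--     """Format a tooltip.
--
--     :param header: The already translated header string.
--         The header should be a plain string to be automatically formatted.
--     :param body: The already translated body string.
--         The body may already be HTML formatted.
--         Otherwise, one or more empty lines will be treated as the start of
--         a paragraph.
--     :return: The HTML formatted tooltip.
--     """
--     is_in_list = False
--     if body is None:
--         body = ''
--     elif not body.startswith('<'):
--         parts = []
--         between = True
--         for line in body.split('\n'):
--             line = line.strip()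
--             if len(line):
--                 if between:
--                     parts.append('\n<p>')
--                     between = False
--                 else:
--                     parts.append('\n')
--                 if line.startswith('*'):
--                     if not is_in_list:
--                         parts.append('<ul>')
--                         is_in_list = True
--                     parts.append('<li>')
--                     parts.append(line[1:].strip())
--                     parts.append('</li>')
--                 else:
--                     if is_in_list:
--                         parts.append('</ul>')
--                         is_in_list = False
--                     parts.append(line)
--             elif not between:
--                 parts.append('</p>')
--                 between = True
--         if not between:
--             parts.append('</p>')
--         body = ''.join(parts)
--     return f'<html><head/><body><h3>{header}</h3>{body}</body></html>'
-- ===== SOURCE B (Python) =====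
-- def tooltip_format(header: str, body: str) -> str:
--     """Format a tooltip (two-pass: group paragraph blocks, then render)."""
--     if body is None:
--         body = ''
--     elif not body.startswith('<'):
--         # pass 1: strip lines, group maximal runs of non-empty lines into blocks
--         blocks = []
--         cur = []
--         for line in body.split('\n'):
--             line = line.strip()
--             if line:
--                 cur.append(line)
--             elif cur:
--                 blocks.append(cur)
--                 cur = []
--         if cur:
--             blocks.append(cur)
--         # pass 2: render each block as a paragraph, threading is_in_list across blocks
--         out = []
--         is_in_list = False
--         for block in blocks:
--             rendered = []
--             for line in block:
--                 if line.startswith('*'):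
--                     item = '<li>' + line[1:].strip() + '</li>'
--                     rendered.append(item if is_in_list else '<ul>' + item)
--                     is_in_list = True
--                 else:
--                     rendered.append('</ul>' + line if is_in_list else line)
--                     is_in_list = False
--             out.append('\n<p>' + '\n'.join(rendered) + '</p>')
--         body = ''.join(out)
--     return f'<html><head/><body><h3>{header}</h3>{body}</body></html>'
-- ===== Notes on version B (the rewrite author's own statement) =====
-- stated objective: alternative
-- what changed: A builds the HTML in a single state-machine pass over the lines (flags 'between' and 'is_in_list' interleaved); B first groups the stripped lines into maximal non-empty runs (paragraph blocks) and then renders each block as a '<p>...</p>' paragraph, threading only the list flag across blocks.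
import Mathlib
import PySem

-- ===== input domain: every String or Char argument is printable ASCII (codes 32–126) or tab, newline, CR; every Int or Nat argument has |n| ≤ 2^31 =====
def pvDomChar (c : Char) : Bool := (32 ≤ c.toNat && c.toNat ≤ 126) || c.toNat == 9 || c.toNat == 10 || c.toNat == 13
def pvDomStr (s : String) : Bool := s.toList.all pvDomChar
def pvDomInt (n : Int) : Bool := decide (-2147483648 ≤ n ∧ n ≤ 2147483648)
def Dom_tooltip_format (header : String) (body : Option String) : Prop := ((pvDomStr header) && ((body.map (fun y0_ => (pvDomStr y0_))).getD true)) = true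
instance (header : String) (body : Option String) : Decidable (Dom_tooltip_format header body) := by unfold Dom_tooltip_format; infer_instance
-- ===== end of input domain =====

-- B re-implements A by a different decomposition (two passes: group paragraph blocks, then render); equal return value, no speed claim.

-- ===== PORT A =====
-- one loop iteration of A: state (parts, between, is_in_list), one raw line
def tooltipAStep (st : List String × Bool × Bool) (rawline : String) : List String × Bool × Bool :=
  let parts := st.1
  let between := st.2.1
  let isInList := st.2.2
  let line := PySem.Str.strip rawline
  if PySem.Str.len line ≠ 0 then
    let parts := if between then parts ++ ["\n<p>"] else parts ++ ["\n"]
    if PySem.Str.startswith line "*" then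
      let parts := if !isInList then parts ++ ["<ul>"] else parts
      (parts ++ ["<li>", PySem.Str.strip (PySem.Str.slice line (some 1) none), "</li>"], false, true)
    else
      let parts := if isInList then parts ++ ["</ul>"] else parts
      (parts ++ [line], false, false)
  else if !between then (parts ++ ["</p>"], true, isInList)
  else (parts, between, isInList)

def tooltip_format (header : String) (body : Option String) : String :=
  let bodyStr :=
    match body with
    | none => ""
    | some b =>
      if !(PySem.Str.startswith b "<") then
        let st := ((PySem.Str.split? b "\n").getD []).foldl tooltipAStep ([], true, false)
        let parts := if !st.2.1 then st.1 ++ ["</p>"] else st.1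
        PySem.Str.join "" parts
      else b
  "<html><head/><body><h3>" ++ header ++ "</h3>" ++ bodyStr ++ "</body></html>"

-- ===== PORT B =====
-- pass 1 step: group maximal runs of non-empty stripped lines; state (blocks, cur)
def tooltipGroupStep (st : List (List String) × List String) (rawline : String) : List (List String) × List String :=
  let line := PySem.Str.strip rawline
  if line ≠ "" then (st.1, st.2 ++ [line])
  else if st.2 ≠ [] then (st.1 ++ [st.2], [])
  else st

-- pass 2 inner step: render one line; state (rendered, is_in_list)
def tooltipLineStep (st : List String × Bool) (line : String) : List String × Bool :=
  if PySem.Str.startswith line "*" then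
    let item := "<li>" ++ PySem.Str.strip (PySem.Str.slice line (some 1) none) ++ "</li>"
    (st.1 ++ [if st.2 then item else "<ul>" ++ item], true)
  else
    (st.1 ++ [if st.2 then "</ul>" ++ line else line], false)

-- pass 2 outer step: render one block as a paragraph; state (out, is_in_list)
def tooltipBlockStep (st : List String × Bool) (block : List String) : List String × Bool :=
  let rr := block.foldl tooltipLineStep ([], st.2)
  (st.1 ++ ["\n<p>" ++ PySem.Str.join "\n" rr.1 ++ "</p>"], rr.2)

def tooltip_format_alt (header : String) (body : Option String) : String :=
  let bodyStr :=
    match body with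
    | none => ""
    | some b =>
      if !(PySem.Str.startswith b "<") then
        let g := ((PySem.Str.split? b "\n").getD []).foldl tooltipGroupStep ([], [])
        let blocks := if g.2 ≠ [] then g.1 ++ [g.2] else g.1
        let r := blocks.foldl tooltipBlockStep ([], false)
        PySem.Str.join "" r.1
      else b
  "<html><head/><body><h3>" ++ header ++ "</h3>" ++ bodyStr ++ "</body></html>"

-- ===== PRECONDITION & SPEC =====
def Spec_tooltip_format (header : String) (body : Option String) (out : String) : Prop := out = tooltip_format_alt header body
instance (header : String) (body : Option String) (out : String) : Decidable (Spec_tooltip_format header body out) := by unfold Spec_tooltip_format; infer_instance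

-- ===== CLAIM (what is proved, stated in full; the proofs are below) =====
def Claim_equal_tooltip_format : Prop := ∀ (header : String) (body : Option String), Dom_tooltip_format header body → Spec_tooltip_format header body (tooltip_format header body)

-- ===== LEMMAS AND PROOFS =====

-- abstract per-line renderer and list-flag update
def tfRl (il : Bool) (s : String) : String :=
  if PySem.Str.startswith s "*" then
    (if il then "<li>" ++ PySem.Str.strip (PySem.Str.slice s (some 1) none) ++ "</li>"
     else "<ul>" ++ ("<li>" ++ PySem.Str.strip (PySem.Str.slice s (some 1) none) ++ "</li>"))
  else (if il then "</ul>" ++ s else s)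

def tfUpd (il : Bool) (s : String) : Bool := PySem.Str.startswith s "*"

-- A's remaining output as a recursive function over the raw lines
def tfArest : List String → Bool → Bool → String
  | [], between, _ => if between then "" else "</p>"
  | l :: ls, between, il =>
    let s := PySem.Str.strip l
    if s ≠ "" then
      (if between then "\n<p>" else "\n") ++ tfRl il s ++ tfArest ls false (tfUpd il s)
    else if between then tfArest ls true il
    else "</p>" ++ tfArest ls true il

-- B's grouping as a recursive function
def tfGrp : List String → List String → List (List String)
  | cur, [] => if cur ≠ [] then [cur] else []
  | cur, l :: ls =>
    let s := PySem.Str.strip l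
    if s ≠ "" then tfGrp (cur ++ [s]) ls
    else if cur ≠ [] then cur :: tfGrp [] ls
    else tfGrp [] ls

-- rendered-line list of a block
def tfRlist : List String → Bool → List String
  | [], _ => []
  | s :: ss, il => tfRl il s :: tfRlist ss (tfUpd il s)

-- tail of a block render (each line preceded by "\n")
def tfJtail : List String → Bool → String
  | [], _ => ""
  | s :: ss, il => "\n" ++ tfRl il s ++ tfJtail ss (tfUpd il s)

-- B's rendering of a block list
def tfRB : List (List String) → Bool → String
  | [], _ => ""
  | b :: bs, il =>
    (match b with
     | [] => "\n<p>" ++ "</p>"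
     | c :: cs => "\n<p>" ++ tfRl il c ++ tfJtail cs (tfUpd il c) ++ "</p>")
    ++ tfRB bs (List.foldl tfUpd il b)

-- string helpers
theorem str_ext' {a b : String} (h : a.toList = b.toList) : a = b := by
  rw [← String.ofList_toList (s := a), h, String.ofList_toList]

theorem chars_join_nil_flatten : ∀ l : List (List Char), PySem.Chars.join [] l = l.flatten
  | [] => by simp [PySem.Chars.join_nil]
  | [p] => by simp [PySem.Chars.join_singleton]
  | p :: q :: rest => by
      rw [PySem.Chars.join_cons_cons]
      simp [chars_join_nil_flatten (q :: rest)]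

theorem join0_nil : PySem.Str.join "" [] = "" := by
  apply str_ext'; simp [PySem.Str.toList_join, PySem.Chars.join_nil]

theorem join0_append (xs ys : List String) :
    PySem.Str.join "" (xs ++ ys) = PySem.Str.join "" xs ++ PySem.Str.join "" ys := by
  apply str_ext'
  simp [PySem.Str.toList_join, chars_join_nil_flatten]

theorem join0_singleton (x : String) : PySem.Str.join "" [x] = x := by
  apply str_ext'; simp [PySem.Str.toList_join, chars_join_nil_flatten]

theorem joinN_singleton (sep x : String) : PySem.Str.join sep [x] = x := by
  apply str_ext'; simp [PySem.Str.toList_join, PySem.Chars.join_singleton]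

theorem joinN_cons_cons (sep x y : String) (rest : List String) :
    PySem.Str.join sep (x :: y :: rest) = x ++ sep ++ PySem.Str.join sep (y :: rest) := by
  apply str_ext'
  simp [PySem.Str.toList_join, PySem.Chars.join_cons_cons]

theorem joinN_nil (sep : String) : PySem.Str.join sep [] = "" := by
  apply str_ext'; simp [PySem.Str.toList_join, PySem.Chars.join_nil]

-- A's fold equals tfArest
theorem join0_cons (x : String) (xs : List String) :
    PySem.Str.join "" (x :: xs) = x ++ PySem.Str.join "" xs := by
  apply str_ext'
  simp [PySem.Str.toList_join, chars_join_nil_flatten]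

theorem str_append_empty' (s : String) : s ++ "" = s := by
  apply str_ext'; simp

set_option maxHeartbeats 1000000 in
theorem foldA (ls : List String) : ∀ (parts : List String) (between il : Bool),
    PySem.Str.join "" ((fun st => if !st.2.1 then st.1 ++ ["</p>"] else st.1)
      (ls.foldl tooltipAStep (parts, between, il)))
    = PySem.Str.join "" parts ++ tfArest ls between il := by
  intro parts between il
  induction ls generalizing parts between il with
  | nil =>
    cases between with
    | true =>
      show PySem.Str.join "" parts = PySem.Str.join "" parts ++ ""
      rw [str_append_empty']
    | false =>
      show PySem.Str.join "" (parts ++ ["</p>"]) = PySem.Str.join "" parts ++ "</p>"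
      rw [join0_append, join0_cons, join0_nil, str_append_empty']
  | cons l ls ih =>
    rw [List.foldl_cons]
    by_cases hs : PySem.Str.strip l = ""
    · have hs' : PySem.Chars.strip l.toList = [] := by
        have := congrArg String.toList hs
        simpa [PySem.Str.toList_strip] using this
      cases between with
      | true =>
        have hstep : tooltipAStep (parts, true, il) l = (parts, true, il) := by
          simp [tooltipAStep, hs']
        rw [hstep, ih, show tfArest (l :: ls) true il = tfArest ls true il by simp [tfArest, hs]]
      | false =>
        have hstep : tooltipAStep (parts, false, il) l = (parts ++ ["</p>"], true, il) := by
          simp [tooltipAStep, hs']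
        rw [hstep, ih,
            show tfArest (l :: ls) false il = "</p>" ++ tfArest ls true il by simp [tfArest, hs]]
        simp [join0_append, join0_cons, join0_nil, String.append_assoc]
    · have hs2 : ¬ PySem.Chars.strip l.toList = [] := by
        intro h; apply hs; apply str_ext'; simp [PySem.Str.toList_strip, h]
      have hArest : tfArest (l :: ls) between il
          = (if between then "\n<p>" else "\n") ++ tfRl il (PySem.Str.strip l)
             ++ tfArest ls false (tfUpd il (PySem.Str.strip l)) := by
        simp [tfArest, hs, String.append_assoc]
      by_cases hbul : PySem.Str.startswith (PySem.Str.strip l) "*" = true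
      · have hbul2 : PySem.Chars.startswith (PySem.Chars.strip l.toList) ['*'] = true := by
          simpa [PySem.Str.toList_strip] using hbul
        have hstep : tooltipAStep (parts, between, il) l
            = ((if between then parts ++ ["\n<p>"] else parts ++ ["\n"])
               ++ (if il then [] else ["<ul>"])
               ++ ["<li>", PySem.Str.strip (PySem.Str.slice (PySem.Str.strip l) (some 1) none), "</li>"],
               false, true) := by
          cases il <;> cases between <;> simp [tooltipAStep, hs2, hbul2]
        rw [hstep, ih, hArest]
        cases il <;> cases between <;>
          simp [join0_append, join0_cons, join0_nil, tfRl, tfUpd, hbul2, String.append_assoc]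
      · have hbul2 : PySem.Chars.startswith (PySem.Chars.strip l.toList) ['*'] = false := by
          have : PySem.Str.startswith (PySem.Str.strip l) "*" = false := by simpa using hbul
          simpa [PySem.Str.toList_strip] using this
        have hstep : tooltipAStep (parts, between, il) l
            = ((if between then parts ++ ["\n<p>"] else parts ++ ["\n"])
               ++ (if il then ["</ul>"] else [])
               ++ [PySem.Str.strip l], false, false) := by
          cases il <;> cases between <;> simp [tooltipAStep, hs2, hbul2]
        rw [hstep, ih, hArest]
        cases il <;> cases between <;>
          simp [join0_append, join0_cons, join0_nil, tfRl, tfUpd, hbul2, String.append_assoc]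

-- B's grouping fold equals tfGrp
theorem foldG (ls : List String) : ∀ (blocks : List (List String)) (cur : List String),
    (fun g => if g.2 ≠ [] then g.1 ++ [g.2] else g.1) (ls.foldl tooltipGroupStep (blocks, cur))
    = blocks ++ tfGrp cur ls := by
  intro blocks cur
  induction ls generalizing blocks cur with
  | nil => by_cases h : cur = [] <;> simp [tfGrp, h]
  | cons l ls ih =>
    by_cases hs : PySem.Str.strip l = ""
    · by_cases hc : cur = []
      · simp [tooltipGroupStep, tfGrp, hs, hc, ih]
      · simp [tooltipGroupStep, tfGrp, hs, hc, ih]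
    · simp [tooltipGroupStep, tfGrp, hs, ih]

-- B's inner fold computes tfRlist
theorem foldLine (b : List String) : ∀ (rendered : List String) (il : Bool),
    b.foldl tooltipLineStep (rendered, il) = (rendered ++ tfRlist b il, List.foldl tfUpd il b) := by
  intro rendered il
  induction b generalizing rendered il with
  | nil => simp [tfRlist]
  | cons s ss ih =>
    by_cases hb : PySem.Chars.startswith s.toList ['*'] = true <;>
      simp [tooltipLineStep, tfRlist, tfRl, tfUpd, hb, ih]

theorem joinN_rlist (cs : List String) : ∀ (c : String) (il : Bool),
    PySem.Str.join "\n" (tfRlist (c :: cs) il) = tfRl il c ++ tfJtail cs (tfUpd il c) := by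
  intro c il
  induction cs generalizing c il with
  | nil => simp [tfRlist, tfJtail, joinN_singleton]
  | cons s ss ih =>
    simp only [tfRlist, joinN_cons_cons]
    rw [show tfRl (tfUpd il c) s :: tfRlist ss (tfUpd (tfUpd il c) s) = tfRlist (s :: ss) (tfUpd il c) from rfl]
    simp [ih, tfJtail, String.append_assoc]

-- B's outer fold computes tfRB
theorem foldB (bs : List (List String)) : ∀ (out : List String) (il : Bool),
    PySem.Str.join "" ((bs.foldl tooltipBlockStep (out, il)).1)
    = PySem.Str.join "" out ++ tfRB bs il := by
  intro out il
  induction bs generalizing out il with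
  | nil => simp [tfRB, joinN_nil]
  | cons b bs ih =>
    simp only [List.foldl_cons, tooltipBlockStep, foldLine]
    cases b with
    | nil =>
      simp [ih, tfRB, tfRlist, joinN_nil, join0_append, join0_singleton, String.append_assoc]
    | cons c cs =>
      simp [ih, tfRB, joinN_rlist, join0_append, join0_singleton, String.append_assoc]

theorem tfJtail_append (cs : List String) : ∀ (s : String) (il : Bool),
    tfJtail (cs ++ [s]) il = tfJtail cs il ++ ("\n" ++ tfRl (List.foldl tfUpd il cs) s) := by
  intro s il
  induction cs generalizing il with
  | nil => simp [tfJtail]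
  | cons c cs ih => simp [tfJtail, ih, String.append_assoc]

-- core: A's one-pass machine equals B's group-then-render
theorem tfCore (ls : List String) :
    (∀ il, tfArest ls true il = tfRB (tfGrp [] ls) il) ∧
    (∀ (c : String) (cs : List String) (il : Bool),
      tfRB (tfGrp (c :: cs) ls) il
        = "\n<p>" ++ tfRl il c ++ tfJtail cs (tfUpd il c) ++ tfArest ls false (List.foldl tfUpd (tfUpd il c) cs)) := by
  induction ls with
  | nil =>
    constructor
    · intro il; simp [tfArest, tfGrp, tfRB]
    · intro c cs il; simp [tfArest, tfGrp, tfRB, String.append_assoc]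
  | cons l ls ih =>
    constructor
    · intro il
      by_cases hs : PySem.Str.strip l = ""
      · simp [tfArest, tfGrp, hs, ih.1]
      · have h2 := ih.2 (PySem.Str.strip l) [] il
        simp only [tfJtail, List.foldl_nil] at h2
        simp [tfArest, tfGrp, hs, h2, String.append_assoc]
    · intro c cs il
      by_cases hs : PySem.Str.strip l = ""
      · have h1 := ih.1 (List.foldl tfUpd (tfUpd il c) cs)
        simp [tfArest, tfGrp, tfRB, hs, h1, String.append_assoc]
      · have h2 := ih.2 c (cs ++ [PySem.Str.strip l]) il
        simp only [tfJtail_append, List.foldl_append, List.foldl_cons, List.foldl_nil] at h2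
        simp [tfArest, tfGrp, hs, h2, String.append_assoc]

-- ===== VERDICT (by name: the statement is the Claim_ definition above) =====
theorem str_empty_append (s : String) : "" ++ s = s := by
  apply str_ext'; simp

theorem tooltip_format_spec : Claim_equal_tooltip_format := by
  intro header body _
  show tooltip_format header body = tooltip_format_alt header body
  cases body with
  | none => rfl
  | some b =>
    by_cases hb : PySem.Str.startswith b "<" = true
    · have hb2 : PySem.Chars.startswith b.toList ['<'] = true := by simpa using hb
      simp [tooltip_format, tooltip_format_alt, hb2]
    · have hb2 : PySem.Chars.startswith b.toList ['<'] = false := by simpa using hb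
      have hA := foldA ((PySem.Str.split? b "\n").getD []) [] true false
      have hG := foldG ((PySem.Str.split? b "\n").getD []) [] []
      have hB := foldB (tfGrp [] ((PySem.Str.split? b "\n").getD [])) [] false
      simp only [join0_nil, str_empty_append, List.nil_append] at hA hG hB
      simp [tooltip_format, tooltip_format_alt, hb2, hG, hB]
      simp only [Bool.not_eq_true'] at hA
      rw [hA, (tfCore ((PySem.Str.split? b "\n").getD [])).1 false]
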